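-- pv_equiv track=rewrite | github.com/Towaiji/SearchBox | app.py | first_hit_span
-- ===== SOURCE A (Python) =====
-- def first_hit_span(text, terms):
--     low = text.lower()
--     positions = []
--     for t in terms:
--         p = low.find(t)
--         if p != -1:
--             positions.append(p)
--     return min(positions) if positions else 0
-- ===== SOURCE B (Python) =====
-- def first_hit_span(text, terms):
--     low = text.lower()
--     i = 0
--     n = len(low)
--     while i < n:
--         if any(low.startswith(t, i) for t in terms):
--             return i
--         i += 1
--     return 0
-- ===== Notes on version B (the rewrite author's own statement) =====
-- stated objective: alternative
-- what changed: Instead of running find for every term over the whole text and collecting the hit positions to take their min, B scans text positions left to right once and returns at the first index where any term starts, so it never looks past the earliest match.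
import Mathlib
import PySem

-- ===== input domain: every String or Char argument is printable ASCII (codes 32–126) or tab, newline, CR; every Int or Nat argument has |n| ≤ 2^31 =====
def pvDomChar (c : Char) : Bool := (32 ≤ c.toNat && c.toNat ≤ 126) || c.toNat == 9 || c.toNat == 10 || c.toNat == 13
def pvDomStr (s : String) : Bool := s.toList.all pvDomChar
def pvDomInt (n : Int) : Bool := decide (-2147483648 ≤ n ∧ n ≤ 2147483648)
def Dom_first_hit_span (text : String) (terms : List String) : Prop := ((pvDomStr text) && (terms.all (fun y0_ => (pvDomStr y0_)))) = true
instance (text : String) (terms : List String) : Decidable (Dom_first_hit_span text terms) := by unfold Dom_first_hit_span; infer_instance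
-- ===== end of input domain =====

-- B replaces A's per-term find + min-of-positions with one left-to-right scan of the text
-- that returns the first index where any term starts (objective: alternative decomposition).

-- ===== PORT A =====
def first_hit_span (text : String) (terms : List String) : Int :=
  let low := PySem.Str.lower text
  let positions := terms.foldl (fun acc t =>
    let p := PySem.Str.find low t
    if p ≠ -1 then acc ++ [p] else acc) ([] : List Int)
  match PySem.List.min? positions (fun x => x) with
  | some m => m
  | none => 0

-- ===== PORT B =====
-- the while-loop of Source B: walk the suffixes of `low` with their start index `i`,
-- return `i` at the first suffix some term is a prefix of (low.startswith(t, i)); else 0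
def pvScan (terms : List (List Char)) : List Char → Nat → Int
  | [], _ => 0
  | c :: rest, i =>
    if terms.any (fun t => PySem.Chars.startswith (c :: rest) t) then (i : Int)
    else pvScan terms rest (i + 1)

def first_hit_span_alt (text : String) (terms : List String) : Int :=
  let low := (PySem.Str.lower text).toList
  pvScan (terms.map String.toList) low 0

-- ===== PRECONDITION & SPEC =====
def Spec_first_hit_span (text : String) (terms : List String) (out : Int) : Prop := out = first_hit_span_alt text terms
instance (text : String) (terms : List String) (out : Int) : Decidable (Spec_first_hit_span text terms out) := by unfold Spec_first_hit_span; infer_instance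

-- ===== CLAIM (what is proved, stated in full; the proofs are below) =====
def Claim_equal_first_hit_span : Prop := ∀ (text : String) (terms : List String), Dom_first_hit_span text terms → Spec_first_hit_span text terms (first_hit_span text terms)

-- ===== LEMMAS AND PROOFS =====

/-- Membership in A's `positions` list. -/
lemma mem_positions (low : String) (terms : List String) (acc : List Int) (p : Int) :
    p ∈ terms.foldl (fun acc t =>
      let q := PySem.Str.find low t
      if q ≠ -1 then acc ++ [q] else acc) acc ↔
    p ∈ acc ∨ ∃ t ∈ terms, PySem.Str.find low t = p ∧ p ≠ -1 := by
  induction terms generalizing acc with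
  | nil => simp
  | cons t ts ih =>
    simp only [List.foldl_cons]
    rw [ih]
    by_cases h : PySem.Str.find low t = -1
    · rw [if_neg (by simpa using h)]
      constructor
      · rintro (hp | ⟨s, hs, hf, hne⟩)
        · exact Or.inl hp
        · exact Or.inr ⟨s, List.mem_cons_of_mem t hs, hf, hne⟩
      · rintro (hp | ⟨s, hs, hf, hne⟩)
        · exact Or.inl hp
        · rcases List.mem_cons.mp hs with rfl | hs'
          · exact absurd (h ▸ hf) (Ne.symm hne)
          · exact Or.inr ⟨s, hs', hf, hne⟩
    · rw [if_pos (by simpa using h)]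
      constructor
      · rintro (hp | ⟨s, hs, hf, hne⟩)
        · rcases List.mem_append.mp hp with hp' | hp'
          · exact Or.inl hp'
          · have : p = PySem.Str.find low t := (List.mem_singleton.mp hp').symm.symm
            exact Or.inr ⟨t, List.mem_cons_self, this.symm, this ▸ h⟩
        · exact Or.inr ⟨s, List.mem_cons_of_mem t hs, hf, hne⟩
      · rintro (hp | ⟨s, hs, hf, hne⟩)
        · exact Or.inl (List.mem_append.mpr (Or.inl hp))
        · rcases List.mem_cons.mp hs with rfl | hs'
          · exact Or.inl (List.mem_append.mpr (Or.inr (by simpa using hf.symm)))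
          · exact Or.inr ⟨s, hs', hf, hne⟩

/-- If no term occurs anywhere in `full`, the scan over any suffix of `full` returns 0. -/
lemma pvScan_no_hit (T : List (List Char)) (full : List Char)
    (H : ∀ t ∈ T, ¬ t <:+: full) :
    ∀ l, l <:+ full → ∀ i, pvScan T l i = 0 := by
  intro l
  induction l with
  | nil => intro _ i; rfl
  | cons c rest ih =>
    intro hsuf i
    have hany : (T.any fun t => PySem.Chars.startswith (c :: rest) t) = false := by
      simp only [List.any_eq_false]
      intro t ht
      simp only [Bool.not_eq_true, ← Bool.not_eq_true, PySem.Chars.startswith_iff]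
      intro hpre
      exact H t ht (hpre.isInfix.trans hsuf.isInfix)
    rw [pvScan, hany]
    simp only [Bool.false_eq_true, if_false]
    exact ih ((List.suffix_cons c rest).trans hsuf) (i + 1)

/-- If the first position (over all terms) where a term starts is `m < |full|`,
    the scan started at any `k ≤ m` returns `m`. -/
lemma pvScan_hit (T : List (List Char)) (full : List Char) (m : Nat)
    (hm : ∃ t ∈ T, t <+: full.drop m)
    (hnot : ∀ j < m, ∀ t ∈ T, ¬ t <+: full.drop j)
    (hlt : m < full.length) :
    ∀ d k, m = k + d → pvScan T (full.drop k) k = (m : Int) := by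
  intro d
  induction d with
  | zero =>
    intro k hk
    have hk' : k = m := by omega
    subst hk'
    obtain ⟨c, rest, hdrop⟩ : ∃ c rest, full.drop k = c :: rest := by
      cases hd : full.drop k with
      | nil => exfalso; have := List.drop_eq_nil_iff.mp hd; omega
      | cons c rest => exact ⟨c, rest, rfl⟩
    have hany : (T.any fun t => PySem.Chars.startswith (c :: rest) t) = true := by
      obtain ⟨t, ht, hpre⟩ := hm
      exact List.any_eq_true.mpr ⟨t, ht, (PySem.Chars.startswith_iff _ _).mpr (hdrop ▸ hpre)⟩
    rw [hdrop, pvScan, hany]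
    simp
  | succ d ih =>
    intro k hk
    have hklt : k < full.length := by omega
    have hdrop : full.drop k = full[k] :: full.drop (k + 1) :=
      List.drop_eq_getElem_cons hklt
    have hany : (T.any fun t => PySem.Chars.startswith (full[k] :: full.drop (k + 1)) t) = false := by
      simp only [List.any_eq_false]
      intro t ht
      simp only [Bool.not_eq_true, PySem.Chars.startswith_iff]
      intro hpre
      exact hnot k (by omega) t ht (hdrop ▸ hpre)
    rw [hdrop, pvScan, hany]
    simp only [Bool.false_eq_true, if_false]
    exact ih (k + 1) (by omega)

-- ===== VERDICT (by name: the statement is the Claim_ definition above) =====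
theorem first_hit_span_spec : Claim_equal_first_hit_span := by
  intro text terms _
  unfold Spec_first_hit_span first_hit_span first_hit_span_alt
  dsimp only
  set low := PySem.Str.lower text with hlow
  set lowL := low.toList with hlowL
  set T := terms.map String.toList with hT
  set positions := terms.foldl (fun acc t =>
    let p := PySem.Str.find low t
    if p ≠ -1 then acc ++ [p] else acc) ([] : List Int) with hpos
  cases hmin : PySem.List.min? positions (fun x => x) with
  | none =>
    have hempty : positions = [] := (PySem.List.min?_eq_none_iff _ _).mp hmin
    have H : ∀ t ∈ T, ¬ t <:+: lowL := by
      intro t ht hinf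
      obtain ⟨s, hs, rfl⟩ := List.mem_map.mp ht
      have hne : PySem.Str.find low s ≠ -1 := by
        rw [PySem.Str.find_eq]; exact (PySem.Chars.find_ne_neg_one_iff _ _).mpr hinf
      have : PySem.Str.find low s ∈ positions :=
        (mem_positions low terms [] _).mpr (Or.inr ⟨s, hs, rfl, hne⟩)
      rw [hempty] at this; exact absurd this (List.not_mem_nil)
    exact (pvScan_no_hit T lowL H lowL List.suffix_rfl 0).symm
  | some m =>
    have hmem : m ∈ positions := PySem.List.min?_mem hmin
    rcases (mem_positions low terms [] m).mp hmem with h0 | ⟨t0, ht0, hf0, hne0⟩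
    · simp at h0
    have hinf0 : t0.toList <:+: lowL := by
      rw [PySem.Str.find_eq] at hf0
      exact (PySem.Chars.find_ne_neg_one_iff _ _).mp (hf0 ▸ hne0)
    have hm0 : 0 ≤ m := by
      rw [PySem.Str.find_eq] at hf0
      exact hf0 ▸ (PySem.Chars.find_nonneg_iff _ _).mpr hinf0
    have hisMin : ∀ p ∈ positions, m ≤ p := by
      intro p hp; exact PySem.List.min?_isMin hmin p hp
    -- every prefix-match position j of any term satisfies m ≤ j
    have hnot : ∀ j < m.toNat, ∀ t ∈ T, ¬ t <+: lowL.drop j := by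
      intro j hj t ht hpre
      obtain ⟨s, hs, rfl⟩ := List.mem_map.mp ht
      have hinf : s.toList <:+: lowL := hpre.isInfix.trans (List.drop_suffix j lowL).isInfix
      have hfind0 : 0 ≤ PySem.Chars.find lowL s.toList :=
        (PySem.Chars.find_nonneg_iff _ _).mpr hinf
      have hne : PySem.Str.find low s ≠ -1 := by
        rw [PySem.Str.find_eq]; exact (PySem.Chars.find_ne_neg_one_iff _ _).mpr hinf
      have hmemf : PySem.Str.find low s ∈ positions :=
        (mem_positions low terms [] _).mpr (Or.inr ⟨s, hs, rfl, hne⟩)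
      have hmle : m ≤ PySem.Str.find low s := hisMin _ hmemf
      have hspec := PySem.Chars.find_spec hfind0
      have hle : (PySem.Chars.find lowL s.toList).toNat ≤ j := by
        by_contra hgt
        exact hspec.2 j (by omega) hpre
      rw [PySem.Str.find_eq, ← hlowL] at hmle
      omega
    have hm : ∃ t ∈ T, t <+: lowL.drop m.toNat := by
      rw [PySem.Str.find_eq] at hf0
      have := (PySem.Chars.find_spec (hf0 ▸ hm0)).1
      exact ⟨t0.toList, List.mem_map.mpr ⟨t0, ht0, rfl⟩, hf0 ▸ this⟩
    by_cases hL : m.toNat < lowL.length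
    · have := pvScan_hit T lowL m.toNat hm hnot hL m.toNat 0 (by omega)
      rw [List.drop_zero] at this
      rw [this, Int.toNat_of_nonneg hm0]
    · -- only possible when lowL = [] and m = 0 (find '' = 0)
      have hlen : m ≤ (lowL.length : Int) := by
        rw [PySem.Str.find_eq] at hf0; exact hf0 ▸ PySem.Chars.find_le_length _ _
      have hmeq : m.toNat = lowL.length := by omega
      have hnil : t0.toList = [] := by
        obtain ⟨t, ht, hpre⟩ := hm
        have hdnil : lowL.drop m.toNat = [] := by
          rw [hmeq, List.drop_length]
        obtain ⟨s, hs, heq⟩ := List.mem_map.mp ht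
        rw [PySem.Str.find_eq] at hf0
        have := (PySem.Chars.find_spec (hf0 ▸ hm0)).1
        rw [hf0, hdnil] at this
        exact List.prefix_nil.mp this
      have hm0' : m = 0 := by
        rw [PySem.Str.find_eq, hnil, PySem.Chars.find_nil] at hf0
        omega
      have hlnil : lowL = [] := by
        have : lowL.length = 0 := by omega
        exact List.eq_nil_of_length_eq_zero this
      rw [hlnil, hm0']
      rfl
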